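-- pv_equiv track=rewrite | github.com/SansPapyrus683/usaco-solutions | official/o2020/jan/bronze/dejaVu/dejaVu.py | peakHeight
-- ===== SOURCE A (Python) =====
-- def peakTotal(peak, end):
--     return peak * (peak + 1) // 2 + ((peak - 1 - end + 1) * (end + peak - 1)) // 2
--
-- def peakHeight(dist, end):  # given dist and end, find the maximum peak so we <= the dist
--     # sometimes we actually accelerate to the finish line before we get to the end speed
--     # so we binsearch for the least time that still stays below
--     validSoFar = end
--     lowerBound = 1
--     upperBound = end
--     while lowerBound <= upperBound:
--         toSearch = (lowerBound + upperBound) // 2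
--         if toSearch * (toSearch + 1) // 2 <= dist:
--             lowerBound = toSearch + 1
--             validSoFar = toSearch
--         else:
--             upperBound = toSearch - 1
--     end = validSoFar
--
--     lowerBound = 1
--     upperBound = dist
--     height_ = -1
--     while lowerBound <= upperBound:  # binsearch for the peak
--         toSearch = (lowerBound + upperBound) // 2
--         if peakTotal(toSearch, end) <= dist:
--             height_ = toSearch
--             lowerBound = toSearch + 1
--         else:
--             upperBound = toSearch - 1
--     return height_, end
-- ===== SOURCE B (Python) =====
-- def _isqrt(n):
--     # integer square root by Newton's method (n assumed >= 0)
--     if n <= 1: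
--         return n
--     guess = 1 << ((n.bit_length() - 1) // 2 + 1)
--     while True:
--         nxt = (guess + n // guess) // 2
--         if nxt < guess:
--             guess = nxt
--         else:
--             return guess
--
--
-- def peakHeight(dist, end):
--     # cap end at the largest k with k*(k+1)//2 <= dist (triangular-number inverse)
--     if dist >= 1 and end >= 1:
--         end = min((_isqrt(8 * dist + 1) - 1) // 2, end)
--     if dist < 1:
--         return -1, end
--     # peakTotal(h, end) == h*h - end*(end-1)//2, so the peak is a square-root inverse
--     tri = end * (end - 1) // 2
--     return min(_isqrt(dist + tri), dist), end
-- ===== Notes on version B (the rewrite author's own statement) =====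
-- stated objective: faster
-- what changed: Both binary searches are replaced by closed forms: the speed cap is the triangular-number inverse (isqrt(8*dist+1)-1)//2 capped by end, and since peakTotal(h,end) == h*h - end*(end-1)//2 the peak is min(isqrt(dist + end*(end-1)//2), dist); isqrt is a hand-written Newton iteration.
import Mathlib
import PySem

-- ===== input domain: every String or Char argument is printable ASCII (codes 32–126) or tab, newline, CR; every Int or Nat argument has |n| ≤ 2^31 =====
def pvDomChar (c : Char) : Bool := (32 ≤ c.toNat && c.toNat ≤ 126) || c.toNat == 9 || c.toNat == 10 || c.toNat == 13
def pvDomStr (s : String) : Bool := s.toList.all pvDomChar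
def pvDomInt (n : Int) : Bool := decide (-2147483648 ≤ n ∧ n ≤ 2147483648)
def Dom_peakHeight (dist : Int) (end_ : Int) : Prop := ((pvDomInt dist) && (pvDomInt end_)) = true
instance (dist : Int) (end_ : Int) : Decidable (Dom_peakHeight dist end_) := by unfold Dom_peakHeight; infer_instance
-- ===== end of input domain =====

-- B replaces A's two binary searches by closed-form triangular/square-root inverses (Newton isqrt): a constant-factor speed objective (fewer iterations per call).


-- ===== PORT A =====
-- peakTotal, line for line (both '//' are Python floor division)
def pvPeakTotal (peak : Int) (end_ : Int) : Int :=
  PySem.Int.floordiv (peak * (peak + 1)) 2 +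
    PySem.Int.floordiv ((peak - 1 - end_ + 1) * (end_ + peak - 1)) 2

-- A's two while-loops share this exact shape (state lowerBound/upperBound/best,
-- midpoint (lo+hi)//2, 'best := mid; lo := mid+1' on success, 'hi := mid-1' on failure);
-- the loop is transcribed once, parametrised by the tested condition.
def pvBinSearch (P : Int → Bool) (lo hi best : Int) : Int :=
  if h : lo ≤ hi then
    let mid := PySem.Int.floordiv (lo + hi) 2
    if P mid then pvBinSearch P (mid + 1) hi mid
    else pvBinSearch P lo (mid - 1) best
  else best
termination_by (hi + 1 - lo).toNat
decreasing_by
  · have := PySem.Int.floordiv_two_mid_bounds h; omega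
  · have := PySem.Int.floordiv_two_mid_bounds h; omega

def peakHeight (dist : Int) (end_ : Int) : Int × Int :=
  let e := pvBinSearch (fun k => decide (PySem.Int.floordiv (k * (k + 1)) 2 ≤ dist)) 1 end_ end_
  let h := pvBinSearch (fun k => decide (pvPeakTotal k e ≤ dist)) 1 dist (-1)
  (h, e)

-- ===== PORT B =====
-- _isqrt's Newton loop: 'nxt = (guess + n // guess) // 2; if nxt < guess: guess = nxt else return guess'
def pvIsqrtIter (n guess : Nat) : Nat :=
  let next := (guess + n / guess) / 2
  if next < guess then pvIsqrtIter n next else guess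
termination_by guess

-- _isqrt; its call sites all have n ≥ 0, where Python's '//' '<<' 'bit_length' agree with
-- Nat division, Nat '<<<' and log2 (bit_length(n) - 1 = log2 n for n ≥ 2); exact there.
def pvIsqrt (n : Int) : Int :=
  if n ≤ 1 then n
  else ((pvIsqrtIter n.toNat (1 <<< (n.toNat.log2 / 2 + 1)) : Nat) : Int)

def peakHeight_alt (dist : Int) (end_ : Int) : Int × Int :=
  let e := if 1 ≤ dist ∧ 1 ≤ end_
    then min (PySem.Int.floordiv (pvIsqrt (8 * dist + 1) - 1) 2) end_
    else end_
  if dist < 1 then (-1, e)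
  else
    let tri := PySem.Int.floordiv (e * (e - 1)) 2
    (min (pvIsqrt (dist + tri)) dist, e)

-- ===== PRECONDITION & SPEC =====
def Spec_peakHeight (dist : Int) (end_ : Int) (out : Int × Int) : Prop := out = peakHeight_alt dist end_
instance (dist : Int) (end_ : Int) (out : Int × Int) : Decidable (Spec_peakHeight dist end_ out) := by unfold Spec_peakHeight; infer_instance

-- ===== CLAIM (what is proved, stated in full; the proofs are below) =====
def Claim_equal_peakHeight : Prop := ∀ (dist : Int) (end_ : Int), Dom_peakHeight dist end_ → Spec_peakHeight dist end_ (peakHeight dist end_)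

-- ===== LEMMAS AND PROOFS =====

-- floor division by 2 is exact on even numbers
theorem pv_fdiv_two (a t : Int) (h : a = t + t) : PySem.Int.floordiv a 2 = t := by
  subst h
  show Int.fdiv (t + t) 2 = t
  have : t + t = 2 * t := by ring
  rw [this, Int.mul_fdiv_cancel_left _ (by norm_num)]

theorem pv_even_mul_pred (e : Int) : ∃ c, e * (e - 1) = c + c := by
  obtain ⟨c, hc⟩ := Int.even_mul_succ_self (e - 1)
  exact ⟨c, by linear_combination hc⟩

-- e*(e-1)//2 ≥ 0 for every integer e
theorem pv_tri_nonneg (e : Int) : 0 ≤ PySem.Int.floordiv (e * (e - 1)) 2 := by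
  obtain ⟨c, hc⟩ := pv_even_mul_pred e
  rw [pv_fdiv_two _ c hc]
  have h8 : 0 ≤ 8 * c + 1 := by nlinarith [sq_nonneg (2 * e - 1)]
  omega

-- the first loop's test, with the floor division eliminated
theorem pv_P1_iff (d k : Int) :
    (decide (PySem.Int.floordiv (k * (k + 1)) 2 ≤ d) = true) ↔ k * (k + 1) ≤ 2 * d := by
  obtain ⟨a, ha⟩ := Int.even_mul_succ_self k
  rw [pv_fdiv_two _ a ha, decide_eq_true_eq, ha]
  omega

-- peakTotal(k, e) = k² - e(e-1)//2, exactly (both Python divisions are of even numbers)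
theorem pv_peakTotal_eq (k e : Int) :
    pvPeakTotal k e = k * k - PySem.Int.floordiv (e * (e - 1)) 2 := by
  obtain ⟨a, ha⟩ := Int.even_mul_succ_self k
  obtain ⟨b, hb⟩ := pv_even_mul_pred k
  obtain ⟨c, hc⟩ := pv_even_mul_pred e
  unfold pvPeakTotal
  have h2 : (k - 1 - e + 1) * (e + k - 1) = (b - c) + (b - c) := by
    have : (k - 1 - e + 1) * (e + k - 1) = k * (k - 1) - e * (e - 1) := by ring
    rw [this, hb, hc]; ring
  rw [pv_fdiv_two _ a ha, pv_fdiv_two _ (b - c) h2, pv_fdiv_two _ c hc]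
  have hk : k * (k + 1) = k * k + k := by ring
  have hk' : k * (k - 1) = k * k - k := by ring
  rw [hk] at ha; rw [hk'] at hb
  omega

theorem pv_P2_iff (d e k : Int) :
    (decide (pvPeakTotal k e ≤ d) = true) ↔ k * k ≤ d + PySem.Int.floordiv (e * (e - 1)) 2 := by
  rw [decide_eq_true_eq, pv_peakTotal_eq]
  omega

-- pvBinSearch on an interval with no accepted point returns the default
theorem pvBinSearch_none (P : Int → Bool) (lo hi best : Int)
    (h : ∀ k, lo ≤ k → k ≤ hi → P k = false) : pvBinSearch P lo hi best = best := by
  by_cases hle : lo ≤ hi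
  · have hb := PySem.Int.floordiv_two_mid_bounds hle
    rw [pvBinSearch, dif_pos hle]
    simp only []
    have hPm := h _ hb.1 hb.2
    rw [hPm]
    simp only [Bool.false_eq_true, if_false]
    exact pvBinSearch_none P lo (PySem.Int.floordiv (lo + hi) 2 - 1) best
      (fun k hk1 hk2 => h k hk1 (by omega))
  · rw [pvBinSearch, dif_neg hle]
termination_by (hi + 1 - lo).toNat
decreasing_by have := PySem.Int.floordiv_two_mid_bounds hle; omega

-- pvBinSearch finds the greatest accepted point, when P is downward closed on [1, ∞)
theorem pvBinSearch_found (P : Int → Bool)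
    (hA : ∀ j k : Int, 1 ≤ j → j ≤ k → P k = true → P j = true)
    (lo hi best m : Int) (hlo : 1 ≤ lo) (h1 : lo ≤ m) (h2 : m ≤ hi) (hPm : P m = true)
    (hmax : ∀ k, m < k → k ≤ hi → P k = false) :
    pvBinSearch P lo hi best = m := by
  have hle : lo ≤ hi := le_trans h1 h2
  have hb := PySem.Int.floordiv_two_mid_bounds hle
  set mid := PySem.Int.floordiv (lo + hi) 2 with hmid
  rw [pvBinSearch, dif_pos hle]
  simp only [← hmid]
  by_cases hP : P mid = true
  · -- accepted: m is at or above mid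
    have hmmid : mid ≤ m := by
      by_contra hc
      have := hmax mid (by omega) hb.2
      rw [this] at hP; exact absurd hP (by simp)
    rw [hP]
    simp only [if_true]
    rcases eq_or_lt_of_le hmmid with heq | hlt
    · subst heq
      exact pvBinSearch_none P (mid + 1) hi mid (fun k hk1 hk2 => hmax k (by omega) hk2)
    · exact pvBinSearch_found P hA (mid + 1) hi mid m (by omega) (by omega) h2 hPm hmax
  · -- rejected: by downward closure, m is below mid
    have hmmid : m < mid := by
      by_contra hc
      exact hP (hA mid m (by omega) (by omega) hPm)
    rw [eq_false_of_ne_true hP]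
    simp only [Bool.false_eq_true, if_false]
    exact pvBinSearch_found P hA lo (mid - 1) best m hlo h1 (by omega) hPm
      (fun k hk1 hk2 => hmax k hk1 (by omega))
termination_by (hi + 1 - lo).toNat
decreasing_by
  · have := PySem.Int.floordiv_two_mid_bounds hle; omega
  · have := PySem.Int.floordiv_two_mid_bounds hle; omega

-- the Newton loop of B is exactly Nat.sqrt's auxiliary iteration
theorem pvIsqrtIter_eq (n g : Nat) : pvIsqrtIter n g = Nat.sqrt.iter n g := by
  rw [pvIsqrtIter, Nat.sqrt.iter]
  split
  · exact pvIsqrtIter_eq n _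
  · rfl
termination_by g
decreasing_by assumption

-- hence pvIsqrt computes ⌊√n⌋ for n ≥ 0
theorem pvIsqrt_eq (n : Int) (hn : 0 ≤ n) : pvIsqrt n = (Nat.sqrt n.toNat : Int) := by
  unfold pvIsqrt
  by_cases h : n ≤ 1
  · rw [if_pos h, Nat.sqrt]
    rw [if_pos (by omega)]
    omega
  · rw [if_neg h, Nat.sqrt, if_neg (by omega), pvIsqrtIter_eq]

theorem pvIsqrt_spec (n : Int) (hn : 0 ≤ n) :
    0 ≤ pvIsqrt n ∧ pvIsqrt n * pvIsqrt n ≤ n ∧ n < (pvIsqrt n + 1) * (pvIsqrt n + 1) := by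
  rw [pvIsqrt_eq n hn]
  have h1 := Nat.sqrt_le n.toNat
  have h2 := Nat.lt_succ_sqrt n.toNat
  refine ⟨by positivity, ?_, ?_⟩
  · have : ((Nat.sqrt n.toNat * Nat.sqrt n.toNat : Nat) : Int) ≤ (n.toNat : Int) := by
      exact_mod_cast h1
    push_cast at this; omega
  · have : ((n.toNat : Nat) : Int) < ((Nat.sqrt n.toNat + 1) * (Nat.sqrt n.toNat + 1) : Nat) := by
      exact_mod_cast h2
    push_cast at this
    have hnn : (n.toNat : Int) = n := Int.toNat_of_nonneg hn
    nlinarith [this]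

-- the first phase of both programs agree: A's first binary search = B's capped triangular inverse
theorem pv_phase1 (dist end_ : Int) :
    pvBinSearch (fun k => decide (PySem.Int.floordiv (k * (k + 1)) 2 ≤ dist)) 1 end_ end_
      = (if 1 ≤ dist ∧ 1 ≤ end_
          then min (PySem.Int.floordiv (pvIsqrt (8 * dist + 1) - 1) 2) end_
          else end_) := by
  by_cases hc : 1 ≤ dist ∧ 1 ≤ end_
  · rw [if_pos hc]
    obtain ⟨hd, he⟩ := hc
    set s := pvIsqrt (8 * dist + 1) with hs
    obtain ⟨hs0, hsq, hsq'⟩ := pvIsqrt_spec (8 * dist + 1) (by omega)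
    rw [← hs] at hs0 hsq hsq'
    have hs3 : 3 ≤ s := by nlinarith
    set T := PySem.Int.floordiv (s - 1) 2 with hT
    have hTb : T * 2 ≤ s - 1 ∧ s - 1 < (T + 1) * 2 :=
      (PySem.Int.floordiv_eq_iff_of_pos (by norm_num)).mp rfl
    have hT1 : 1 ≤ T := by omega
    -- T is the largest k with k(k+1) ≤ 2·dist
    have hTle : T * (T + 1) ≤ 2 * dist := by nlinarith
    have hTgt : 2 * dist < (T + 1) * (T + 2) := by nlinarith
    apply pvBinSearch_found
    · intro j k hj hjk hPk
      rw [pv_P1_iff] at hPk ⊢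
      nlinarith
    · norm_num
    · omega
    · omega
    · rw [pv_P1_iff]
      rcases le_total T end_ with h | h
      · rw [min_eq_left h]; exact hTle
      · rw [min_eq_right h]; nlinarith [min_le_left T end_]
    · intro k hk1 hk2
      rw [← Bool.not_eq_true, pv_P1_iff]
      have hkT : T < k := by
        rcases le_total T end_ with h | h
        · rw [min_eq_left h] at hk1; omega
        · rw [min_eq_right h] at hk1; omega
      push_neg
      nlinarith
  · rw [if_neg hc]
    apply pvBinSearch_none
    intro k hk1 hk2
    have hd : dist ≤ 0 := by
      by_contra h
      exact hc ⟨by omega, le_trans hk1 hk2⟩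
    rw [← Bool.not_eq_true, pv_P1_iff]
    push_neg
    nlinarith

-- the second phase: A's second binary search = B's min(isqrt(dist + tri), dist), for dist ≥ 1
theorem pv_phase2 (dist e : Int) (hd : 1 ≤ dist) :
    pvBinSearch (fun k => decide (pvPeakTotal k e ≤ dist)) 1 dist (-1)
      = min (pvIsqrt (dist + PySem.Int.floordiv (e * (e - 1)) 2)) dist := by
  set C := PySem.Int.floordiv (e * (e - 1)) 2 with hC
  have hC0 : 0 ≤ C := pv_tri_nonneg e
  set r := pvIsqrt (dist + C) with hr
  obtain ⟨hr0, hrq, hrq'⟩ := pvIsqrt_spec (dist + C) (by omega)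
  rw [← hr] at hr0 hrq hrq'
  have hr1 : 1 ≤ r := by nlinarith
  apply pvBinSearch_found
  · intro j k hj hjk hPk
    rw [pv_P2_iff] at hPk ⊢
    nlinarith
  · norm_num
  · omega
  · exact min_le_right r dist
  · rw [pv_P2_iff, ← hC]
    have hm0 : 0 ≤ min r dist := by omega
    have hmr : min r dist ≤ r := min_le_left r dist
    nlinarith
  · intro k hk1 hk2
    rw [← Bool.not_eq_true, pv_P2_iff, ← hC]
    push_neg
    have hrk : r < k := by
      rcases le_total r dist with h | h
      · rw [min_eq_left h] at hk1; omega
      · rw [min_eq_right h] at hk1; omega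
    nlinarith

-- if dist < 1 the second search's range is empty
theorem pv_phase2_empty (dist e : Int) (hd : dist < 1) :
    pvBinSearch (fun k => decide (pvPeakTotal k e ≤ dist)) 1 dist (-1) = -1 :=
  pvBinSearch_none _ _ _ _ (fun k hk1 hk2 => absurd (le_trans hk1 hk2) (by omega))

-- ===== VERDICT (by name: the statement is the Claim_ definition above) =====
theorem peakHeight_spec : Claim_equal_peakHeight := by
  intro dist end_ _
  unfold Spec_peakHeight peakHeight peakHeight_alt
  simp only []
  rw [pv_phase1 dist end_]
  by_cases hd : dist < 1
  · rw [if_pos hd, pv_phase2_empty _ _ hd]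
  · rw [if_neg hd, pv_phase2 _ _ (by omega)]
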